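-- pv_equiv track=rewrite | github.com/hyouteki/Zuber | CLI/zuber_queries.py | getLocationCoordinates
-- ===== SOURCE A (Python) =====
-- def getLocationCoordinates(location: str):
--     location = location.lower().replace(" ", "")
--     hash_table: dict = {
--         'a': (0, 0), 'b': (0, 1), 'c': (0, 2),
--         'd': (1, 0), 'e': (1, 1), 'f': (1, 2),
--         'g': (2, 0), 'h': (2, 1), 'i': (2, 2),
--         'j': (3, 0), 'k': (3, 1), 'l': (3, 2),
--         'm': (4, 0), 'n': (4, 1), 'o': (4, 2),
--         'p': (5, 0), 'q': (5, 1), 'r': (5, 2),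
--         's': (6, 0), 't': (6, 1), 'u': (6, 2),
--         'v': (7, 0), 'w': (7, 1), 'x': (7, 2),
--         'y': (8, 0), 'z': (8, 1), '0': (8, 2),
--         '1': (9, 0), '2': (9, 1), '3': (9, 2),
--         '4': (10, 0), '5': (10, 1), '6': (10, 2),
--         '7': (11, 0), '8': (11, 1), '9': (11, 2),
--     }
--     x: int = 0
--     y: int = 0
--     for char in location:
--         if char in hash_table:
--             x += hash_table[char][0]
--             y += hash_table[char][1]
--     return x, y
-- ===== SOURCE B (Python) =====
-- ALPHABET = "abcdefghijklmnopqrstuvwxyz0123456789"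
--
-- def getLocationCoordinates(location: str):
--     # Two staged passes: build a character histogram of the lowered string once,
--     # then take a weighted sum over the fixed 36-symbol alphabet; symbols outside
--     # the alphabet (spaces included) simply never get looked up.
--     counts = {}
--     for ch in location.lower():
--         counts[ch] = counts.get(ch, 0) + 1
--     x = 0
--     y = 0
--     for i, ch in enumerate(ALPHABET):
--         n = counts.get(ch, 0)
--         x += n * (i // 3)
--         y += n * (i % 3)
--     return x, y
-- ===== Notes on version B (the rewrite author's own statement) =====
-- stated objective: alternative
-- what changed: Instead of scanning the string and adding a table-looked-up coordinate per character, B builds a character histogram in one pass and then computes the answer as a weighted sum over the fixed 36-symbol alphabet (count * (i//3, i%3)), dropping both the lookup table and the space-stripping replace pass.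
import Mathlib
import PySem

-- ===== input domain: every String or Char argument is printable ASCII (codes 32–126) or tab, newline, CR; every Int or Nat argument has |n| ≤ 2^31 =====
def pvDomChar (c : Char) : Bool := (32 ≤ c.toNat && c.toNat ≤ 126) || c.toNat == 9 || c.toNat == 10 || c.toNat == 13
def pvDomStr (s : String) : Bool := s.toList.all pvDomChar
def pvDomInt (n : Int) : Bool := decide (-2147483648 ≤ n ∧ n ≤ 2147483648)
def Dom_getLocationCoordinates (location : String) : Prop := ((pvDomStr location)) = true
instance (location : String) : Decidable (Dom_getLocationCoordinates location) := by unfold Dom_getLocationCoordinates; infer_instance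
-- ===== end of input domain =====

-- B replaces A's per-character table-lookup scan by two staged passes: a character
-- histogram of the lowered string, then a weighted sum over the fixed 36-symbol
-- alphabet — objective: alternative (same cost, no lookup table, no replace pass).

-- ===== PORT A =====
def pvHashTable : PySem.Dict Char (Int × Int) := PySem.Dict.mk [
  ('a', (0, 0)), ('b', (0, 1)), ('c', (0, 2)),
  ('d', (1, 0)), ('e', (1, 1)), ('f', (1, 2)),
  ('g', (2, 0)), ('h', (2, 1)), ('i', (2, 2)),
  ('j', (3, 0)), ('k', (3, 1)), ('l', (3, 2)),
  ('m', (4, 0)), ('n', (4, 1)), ('o', (4, 2)),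
  ('p', (5, 0)), ('q', (5, 1)), ('r', (5, 2)),
  ('s', (6, 0)), ('t', (6, 1)), ('u', (6, 2)),
  ('v', (7, 0)), ('w', (7, 1)), ('x', (7, 2)),
  ('y', (8, 0)), ('z', (8, 1)), ('0', (8, 2)),
  ('1', (9, 0)), ('2', (9, 1)), ('3', (9, 2)),
  ('4', (10, 0)), ('5', (10, 1)), ('6', (10, 2)),
  ('7', (11, 0)), ('8', (11, 1)), ('9', (11, 2))]

-- the loop body: `if char in hash_table: x += …[0]; y += …[1]`
def pvStepA (st : Int × Int) (c : Char) : Int × Int :=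
  match pvHashTable.get? c with
  | some v => (st.1 + v.1, st.2 + v.2)
  | none => st

def getLocationCoordinates (location : String) : Int × Int :=
  let loc := PySem.Str.replace (PySem.Str.lower location) " " ""
  loc.toList.foldl pvStepA (0, 0)

-- ===== PORT B =====
-- ALPHABET = "abcdefghijklmnopqrstuvwxyz0123456789", as the character sequence it is iterated as
def pvAlphabet : List Char := ['a', 'b', 'c', 'd', 'e', 'f', 'g', 'h', 'i', 'j', 'k', 'l', 'm', 'n', 'o', 'p', 'q', 'r', 's', 't', 'u', 'v', 'w', 'x', 'y', 'z', '0', '1', '2', '3', '4', '5', '6', '7', '8', '9']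

def getLocationCoordinates_alt (location : String) : Int × Int :=
  -- counts = {}; for ch in location.lower(): counts[ch] = counts.get(ch, 0) + 1
  let counts : PySem.Dict Char Int :=
    (PySem.Str.lower location).toList.foldl
      (fun d ch => d.insert ch (d.getD ch 0 + 1)) PySem.Dict.empty
  -- for i, ch in enumerate(ALPHABET): n = counts.get(ch, 0); x += n*(i//3); y += n*(i%3)
  (PySem.List.enumerate pvAlphabet).foldl
    (fun st p =>
      let n := counts.getD p.2 0
      (st.1 + n * PySem.Int.floordiv p.1 3, st.2 + n * PySem.Int.mod p.1 3))
    (0, 0)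

-- ===== PRECONDITION & SPEC =====
def Spec_getLocationCoordinates (location : String) (out : Int × Int) : Prop := out = getLocationCoordinates_alt location
instance (location : String) (out : Int × Int) : Decidable (Spec_getLocationCoordinates location out) := by unfold Spec_getLocationCoordinates; infer_instance

-- ===== CLAIM (what is proved, stated in full; the proofs are below) =====
def Claim_equal_getLocationCoordinates : Prop := ∀ (location : String), Dom_getLocationCoordinates location → Spec_getLocationCoordinates location (getLocationCoordinates location)

-- ===== LEMMAS AND PROOFS =====

-- replacing " " by "" is filtering out the spaces
theorem pv_replace_go_space (fuel : Nat) : ∀ (l acc : List Char), l.length ≤ fuel →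
    PySem.Chars.replace.go [' '] [] fuel l acc = acc.reverse ++ l.filter (fun c => !(c == ' ')) := by
  induction fuel with
  | zero =>
    intro l acc h
    have : l = [] := List.eq_nil_of_length_eq_zero (Nat.le_zero.mp h)
    subst this
    rw [PySem.Chars.replace.go]; simp
  | succ n ih =>
    intro l acc h
    cases l with
    | nil => rw [PySem.Chars.replace.go]; simp; omega
    | cons c t =>
      rw [PySem.Chars.replace.go]
      by_cases hc : c = ' '
      · subst hc
        rw [if_pos (by simp [List.isPrefixOf])]
        rw [ih _ _ (by simpa using Nat.le_of_succ_le_succ h)]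
        simp
      · rw [if_neg (by simp [List.isPrefixOf]; exact fun h' => hc h'.symm)]
        rw [ih _ _ (by simpa using Nat.le_of_succ_le_succ h)]
        simp [hc]

theorem pv_replace_space (cs : List Char) :
    PySem.Chars.replace cs [' '] [] = cs.filter (fun c => !(c == ' ')) := by
  rw [PySem.Chars.replace]
  simp only [List.isEmpty_cons]
  exact pv_replace_go_space cs.length cs [] le_rfl

-- per-character contribution of A's loop body
def pvDA (c : Char) : Int × Int :=
  match pvHashTable.get? c with
  | some v => v
  | none => (0, 0)

theorem pvStepA_eq (st : Int × Int) (c : Char) : pvStepA st c = (st.1 + (pvDA c).1, st.2 + (pvDA c).2) := by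
  unfold pvStepA pvDA
  cases pvHashTable.get? c <;> simp

theorem pvDA_big (c : Char) (h : 128 ≤ c.toNat) : pvDA c = (0, 0) := by
  unfold pvDA
  have hk : pvHashTable.get? c = none := by
    rw [PySem.Dict.get?_eq_none_iff_not_mem_keys]
    unfold pvHashTable
    simp only [PySem.Dict.keys_mk, List.map_cons, List.map_nil, List.mem_cons,
      List.not_mem_nil, or_false]
    rintro (rfl | rfl | rfl | rfl | rfl | rfl | rfl | rfl | rfl | rfl | rfl | rfl | rfl | rfl |
      rfl | rfl | rfl | rfl | rfl | rfl | rfl | rfl | rfl | rfl | rfl | rfl | rfl | rfl | rfl |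
      rfl | rfl | rfl | rfl | rfl | rfl | rfl) <;> exact absurd h (by decide)
  rw [hk]

-- B's alphabet pass, abstracted over the count function
def pvAlphaFold (f : Char → Int) : Int × Int :=
  (PySem.List.enumerate pvAlphabet).foldl
    (fun st p => (st.1 + f p.2 * PySem.Int.floordiv p.1 3, st.2 + f p.2 * PySem.Int.mod p.1 3))
    (0, 0)

theorem pv_snd_mem_enumerate {p : Int × Char} {l : List Char} (h : p ∈ PySem.List.enumerate l 0) :
    p.2 ∈ l := by
  obtain ⟨k, hk, rfl⟩ := (PySem.List.mem_enumerate_iff _ _ _).mp h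
  exact List.getElem_mem hk

theorem pvAlphaFold_congr {f g : Char → Int} (h : ∀ ch ∈ pvAlphabet, f ch = g ch) :
    pvAlphaFold f = pvAlphaFold g := by
  unfold pvAlphaFold
  apply PySem.List.foldl_congr_mem
  intro st p hp
  rw [h p.2 (pv_snd_mem_enumerate hp)]

theorem pv_alpha_small : ∀ ch ∈ pvAlphabet, ch.toNat < 128 := by
  intro ch h
  fin_cases h <;> decide

theorem pvAlphaFold_split : ∀ (ps : List (Int × Char)) (f g : Char → Int) (a b : Int × Int),
    ps.foldl (fun st p => (st.1 + (f p.2 + g p.2) * PySem.Int.floordiv p.1 3,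
                           st.2 + (f p.2 + g p.2) * PySem.Int.mod p.1 3)) (a.1 + b.1, a.2 + b.2)
    = ((ps.foldl (fun st p => (st.1 + f p.2 * PySem.Int.floordiv p.1 3,
                               st.2 + f p.2 * PySem.Int.mod p.1 3)) a).1
       + (ps.foldl (fun st p => (st.1 + g p.2 * PySem.Int.floordiv p.1 3,
                                 st.2 + g p.2 * PySem.Int.mod p.1 3)) b).1,
       (ps.foldl (fun st p => (st.1 + f p.2 * PySem.Int.floordiv p.1 3,
                               st.2 + f p.2 * PySem.Int.mod p.1 3)) a).2
       + (ps.foldl (fun st p => (st.1 + g p.2 * PySem.Int.floordiv p.1 3,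
                                 st.2 + g p.2 * PySem.Int.mod p.1 3)) b).2) := by
  intro ps
  induction ps with
  | nil => intro f g a b; rfl
  | cons q t ih =>
    intro f g a b
    simp only [List.foldl_cons]
    have h1 : a.1 + b.1 + (f q.2 + g q.2) * PySem.Int.floordiv q.1 3
        = (a.1 + f q.2 * PySem.Int.floordiv q.1 3) + (b.1 + g q.2 * PySem.Int.floordiv q.1 3) := by ring
    have h2 : a.2 + b.2 + (f q.2 + g q.2) * PySem.Int.mod q.1 3
        = (a.2 + f q.2 * PySem.Int.mod q.1 3) + (b.2 + g q.2 * PySem.Int.mod q.1 3) := by ring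
    rw [h1, h2]
    exact ih f g (a.1 + f q.2 * PySem.Int.floordiv q.1 3, a.2 + f q.2 * PySem.Int.mod q.1 3)
                 (b.1 + g q.2 * PySem.Int.floordiv q.1 3, b.2 + g q.2 * PySem.Int.mod q.1 3)

theorem pvAlphaFold_add (f g : Char → Int) :
    pvAlphaFold (fun ch => f ch + g ch)
      = ((pvAlphaFold f).1 + (pvAlphaFold g).1, (pvAlphaFold f).2 + (pvAlphaFold g).2) := by
  unfold pvAlphaFold
  have := pvAlphaFold_split (PySem.List.enumerate pvAlphabet) f g (0, 0) (0, 0)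
  simpa using this

-- the alphabet pass on an indicator function yields A's per-character contribution
set_option maxRecDepth 8000 in
set_option maxHeartbeats 4000000 in
theorem pvAlphaFold_ind_small : ∀ n < 128,
    pvAlphaFold (fun ch => if ch == Char.ofNat n then 1 else 0) = pvDA (Char.ofNat n) := by decide

theorem pvAlphaFold_ind (c : Char) :
    pvAlphaFold (fun ch => if ch == c then 1 else 0) = pvDA c := by
  by_cases h : c.toNat < 128
  · have := pvAlphaFold_ind_small c.toNat h
    rwa [Char.ofNat_toNat] at this
  · have hz : pvAlphaFold (fun ch => if ch == c then 1 else 0) = pvAlphaFold (fun _ => 0) := by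
      apply pvAlphaFold_congr
      intro ch hch
      have hne : ch ≠ c := by
        intro he
        exact h (he ▸ pv_alpha_small ch hch)
      simp [hne]
    rw [hz, pvDA_big c (le_of_not_gt h)]
    decide

theorem pv_foldl_shift : ∀ (l : List Char) (st : Int × Int),
    l.foldl pvStepA st = (st.1 + (l.foldl pvStepA (0, 0)).1, st.2 + (l.foldl pvStepA (0, 0)).2) := by
  intro l
  induction l with
  | nil => intro st; simp
  | cons c t ih =>
    intro st
    simp only [List.foldl_cons, pvStepA_eq]
    rw [ih (st.1 + (pvDA c).1, st.2 + (pvDA c).2),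
        ih ((0:Int) + (pvDA c).1, (0:Int) + (pvDA c).2)]
    simp; constructor <;> ring

-- MAIN: A's scan equals the alphabet pass over the character counts
theorem pv_main : ∀ (l : List Char),
    l.foldl pvStepA (0, 0) = pvAlphaFold (fun ch => (l.count ch : Int)) := by
  intro l
  induction l with
  | nil =>
    have : (fun ch => ((List.count ch ([] : List Char)) : Int)) = fun _ => (0 : Int) := by
      funext ch; simp
    simp only [List.foldl_nil, this]
    decide
  | cons c t ih =>
    simp only [List.foldl_cons, pvStepA_eq]
    have hc : (fun ch => (((c :: t).count ch) : Int))
        = fun ch => (t.count ch : Int) + (if ch == c then 1 else 0) := by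
      funext ch
      by_cases h : ch = c
      · simp [h]
      · simp [h, Ne.symm h]
    rw [hc, pvAlphaFold_add, ← ih, pvAlphaFold_ind,
        pv_foldl_shift t ((0:Int) + (pvDA c).1, (0:Int) + (pvDA c).2)]
    simp; constructor <;> ring

theorem pv_count_filter (l : List Char) (ch : Char) (h : ch ≠ ' ') :
    (l.filter (fun c => !(c == ' '))).count ch = l.count ch := by
  induction l with
  | nil => rfl
  | cons c t ih =>
    by_cases hc : c = ' '
    · subst hc
      simp [Ne.symm h, ih]
    · simp [hc, List.count_cons, ih]

-- B's two passes, rewritten as the alphabet pass over the exact character counts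
theorem pv_alt_eq (location : String) :
    getLocationCoordinates_alt location
      = pvAlphaFold (fun ch => (((PySem.Str.lower location).toList.count ch : Nat) : Int)) := by
  unfold getLocationCoordinates_alt pvAlphaFold
  simp only [PySem.Dict.getD_foldl_insert_add_one, PySem.Dict.getD_empty, zero_add]

-- ===== VERDICT (by name: the statement is the Claim_ definition above) =====
theorem getLocationCoordinates_spec : Claim_equal_getLocationCoordinates := by
  intro location _
  unfold Spec_getLocationCoordinates getLocationCoordinates
  simp only [PySem.Str.toList_replace]
  have h1 : (" " : String).toList = [' '] := rfl
  have h2 : ("" : String).toList = [] := rfl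
  rw [h1, h2, pv_replace_space, pv_main, pv_alt_eq]
  apply pvAlphaFold_congr
  intro ch hch
  have hs : ch ≠ ' ' := by
    intro he
    subst he
    exact absurd hch (by decide)
  rw [pv_count_filter _ _ hs]
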